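-- pv_equiv track=rewrite | github.com/berketez/black-widow | karadul/reconstruction/c_type_recoverer.py | _find_var_function
-- ===== SOURCE A (Python) =====
-- def _find_var_function(var: str, tags: list[str]) -> str | None:
--     """Degiskenin ait oldugu fonksiyonu tag'lerden bul.
--
--     v1.7.2: call_arg tag'inde caller ismi de var (4. bolum).
--     """
--     for tag in tags:
--         if tag.startswith("return_in:"):
--             return tag.split(":", 1)[1]
--     # v1.7.2: call_arg:callee:idx:caller formatindan caller al
--     for tag in tags:
--         if tag.startswith("call_arg:"):
--             parts = tag.split(":")
--             if len(parts) >= 4 and parts[3]: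
--                 return parts[3]
--     # v1.8: in_stack_usage tag'inden fonksiyon ismi
--     for tag in tags:
--         if tag.startswith("in_stack_usage:"):
--             return tag.split(":", 1)[1]
--     return None
-- ===== SOURCE B (Python) =====
-- def _find_var_function(var: str, tags: list[str]) -> str | None:
--     """Single pass: remember the first candidate of each tag class, then pick by priority."""
--     best_ret = None
--     best_call = None
--     best_stack = None
--     for tag in tags:
--         if best_ret is None and tag.startswith("return_in:"):
--             best_ret = tag.split(":", 1)[1]
--         if best_call is None and tag.startswith("call_arg:"):
--             parts = tag.split(":")
--             if len(parts) >= 4 and parts[3]: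
--                 best_call = parts[3]
--         if best_stack is None and tag.startswith("in_stack_usage:"):
--             best_stack = tag.split(":", 1)[1]
--     if best_ret is not None:
--         return best_ret
--     if best_call is not None:
--         return best_call
--     return best_stack
-- ===== Notes on version B (the rewrite author's own statement) =====
-- stated objective: alternative
-- what changed: Replaces A's three sequential scans over tags (one per tag class, each with an early return) by a single pass that records the first matching candidate of each of the three classes in three Optional locals and then selects by priority after the loop.
import Mathlib
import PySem

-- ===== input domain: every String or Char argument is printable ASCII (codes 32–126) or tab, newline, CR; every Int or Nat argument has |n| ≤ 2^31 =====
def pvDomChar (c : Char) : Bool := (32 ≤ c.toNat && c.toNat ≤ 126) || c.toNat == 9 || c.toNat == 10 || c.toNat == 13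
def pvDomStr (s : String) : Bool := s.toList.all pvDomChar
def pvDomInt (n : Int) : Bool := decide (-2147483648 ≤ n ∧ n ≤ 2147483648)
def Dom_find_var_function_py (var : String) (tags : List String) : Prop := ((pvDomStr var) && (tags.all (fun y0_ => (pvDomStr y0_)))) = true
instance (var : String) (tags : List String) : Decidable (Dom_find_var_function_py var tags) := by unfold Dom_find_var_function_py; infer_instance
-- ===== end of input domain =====

-- B replaces A's three sequential early-return scans by one pass that keeps the first candidate
-- of each tag class in three Option locals and selects by priority afterwards (objective: alternative).

-- ===== PORT A =====
-- first loop: `for tag in tags: if tag.startswith("return_in:"): return tag.split(":", 1)[1]`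
-- (the [1] index is always in range when startswith holds, since the tag then contains ':')
def loopA_return : List String → Option String
  | [] => none
  | t :: rest =>
    if PySem.Str.startswith t "return_in:" then
      PySem.List.pyGet? ((PySem.Str.splitMax? t ":" 1).getD []) 1
    else loopA_return rest

-- second loop: `for tag in tags: if tag.startswith("call_arg:"): parts = tag.split(":"); if len(parts) >= 4 and parts[3]: return parts[3]`
def loopA_call : List String → Option String
  | [] => none
  | t :: rest =>
    if PySem.Str.startswith t "call_arg:" then
      let parts := (PySem.Str.split? t ":").getD []
      if 4 ≤ parts.length ∧ (PySem.List.pyGet? parts 3).getD "" ≠ "" then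
        PySem.List.pyGet? parts 3
      else loopA_call rest
    else loopA_call rest

-- third loop: `for tag in tags: if tag.startswith("in_stack_usage:"): return tag.split(":", 1)[1]`
def loopA_stack : List String → Option String
  | [] => none
  | t :: rest =>
    if PySem.Str.startswith t "in_stack_usage:" then
      PySem.List.pyGet? ((PySem.Str.splitMax? t ":" 1).getD []) 1
    else loopA_stack rest

def find_var_function_py (var : String) (tags : List String) : Option String :=
  match loopA_return tags with
  | some v => some v
  | none =>
    match loopA_call tags with
    | some v => some v
    | none => loopA_stack tags

-- ===== PORT B =====
-- single pass over tags, three accumulators each set only the first time its pattern matches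
def bLoop : List String → Option String → Option String → Option String → Option String
  | [], bestRet, bestCall, bestStack =>
    (match bestRet with
     | some v => some v
     | none =>
       match bestCall with
       | some v => some v
       | none => bestStack)
  | t :: rest, bestRet, bestCall, bestStack =>
    let bestRet' :=
      if bestRet = none ∧ PySem.Str.startswith t "return_in:" = true then
        PySem.List.pyGet? ((PySem.Str.splitMax? t ":" 1).getD []) 1
      else bestRet
    let bestCall' :=
      if bestCall = none ∧ PySem.Str.startswith t "call_arg:" = true then
        (let parts := (PySem.Str.split? t ":").getD []
         if 4 ≤ parts.length ∧ (PySem.List.pyGet? parts 3).getD "" ≠ "" then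
           PySem.List.pyGet? parts 3
         else bestCall)
      else bestCall
    let bestStack' :=
      if bestStack = none ∧ PySem.Str.startswith t "in_stack_usage:" = true then
        PySem.List.pyGet? ((PySem.Str.splitMax? t ":" 1).getD []) 1
      else bestStack
    bLoop rest bestRet' bestCall' bestStack'

def find_var_function_py_alt (var : String) (tags : List String) : Option String :=
  bLoop tags none none none

-- ===== PRECONDITION & SPEC =====
def Spec_find_var_function_py (var : String) (tags : List String) (out : Option String) : Prop := out = find_var_function_py_alt var tags
instance (var : String) (tags : List String) (out : Option String) : Decidable (Spec_find_var_function_py var tags out) := by unfold Spec_find_var_function_py; infer_instance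

-- ===== CLAIM (what is proved, stated in full; the proofs are below) =====
def Claim_equal_find_var_function_py : Prop := ∀ (var : String) (tags : List String), Dom_find_var_function_py var tags → Spec_find_var_function_py var tags (find_var_function_py var tags)

-- ===== LEMMAS AND PROOFS =====

-- splitting "p ++ ':' ++ u" with maxsplit 1 yields exactly two pieces
lemma splitOnMax_return_len (u : List Char) :
    (PySem.Chars.splitOnMax ("return_in:".toList ++ u) ":".toList 1).length = 2 := by
  simp [PySem.Chars.splitOnMax, PySem.Chars.splitOnMax.go, List.isPrefixOf]
  cases u <;> simp [PySem.Chars.splitOnMax.go]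

lemma splitOnMax_stack_len (u : List Char) :
    (PySem.Chars.splitOnMax ("in_stack_usage:".toList ++ u) ":".toList 1).length = 2 := by
  simp [PySem.Chars.splitOnMax, PySem.Chars.splitOnMax.go, List.isPrefixOf]
  cases u <;> simp [PySem.Chars.splitOnMax.go]

lemma pyGet?_pair (a b : String) : PySem.List.pyGet? [a, b] 1 = some b := by
  simp [PySem.List.pyGet?, PySem.List.pyIdx?]

lemma pyGet?_three_isSome (l : List String) (h : 4 ≤ l.length) :
    ∃ v, PySem.List.pyGet? l 3 = some v := by
  match l, h with
  | a :: b :: c :: d :: r, _ =>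
    refine ⟨d, ?_⟩
    simp [PySem.List.pyGet?, PySem.List.pyIdx?,
      show ((3 : ℤ) ≤ (r.length : ℤ) + 1 + 1 + 1) from by omega]

lemma ret_isSome (t : String) (h : PySem.Str.startswith t "return_in:" = true) :
    ∃ v, PySem.List.pyGet? ((PySem.Str.splitMax? t ":" 1).getD []) 1 = some v := by
  rw [PySem.Str.startswith_eq, PySem.Chars.startswith_iff] at h
  obtain ⟨u, hu⟩ := h
  have hmap := PySem.Str.splitMax?_map t ":" 1
  rw [show PySem.Chars.splitMax? t.toList ":".toList 1 =
        some (PySem.Chars.splitOnMax t.toList ":".toList 1) from by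
      simp [PySem.Chars.splitMax?]] at hmap
  cases hL : PySem.Str.splitMax? t ":" 1 with
  | none => rw [hL] at hmap; simp at hmap
  | some L =>
    rw [hL] at hmap
    simp only [Option.map_some, Option.some.injEq] at hmap
    have hlen : L.length = 2 := by
      have := splitOnMax_return_len u
      rw [hu] at this
      calc L.length = (L.map String.toList).length := by simp
        _ = 2 := by rw [hmap]; rw [← hu] at this ⊢; exact this
    obtain ⟨a, b, rfl⟩ := List.length_eq_two.mp hlen
    exact ⟨b, pyGet?_pair a b⟩

lemma stack_isSome (t : String) (h : PySem.Str.startswith t "in_stack_usage:" = true) :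
    ∃ v, PySem.List.pyGet? ((PySem.Str.splitMax? t ":" 1).getD []) 1 = some v := by
  rw [PySem.Str.startswith_eq, PySem.Chars.startswith_iff] at h
  obtain ⟨u, hu⟩ := h
  have hmap := PySem.Str.splitMax?_map t ":" 1
  rw [show PySem.Chars.splitMax? t.toList ":".toList 1 =
        some (PySem.Chars.splitOnMax t.toList ":".toList 1) from by
      simp [PySem.Chars.splitMax?]] at hmap
  cases hL : PySem.Str.splitMax? t ":" 1 with
  | none => rw [hL] at hmap; simp at hmap
  | some L =>
    rw [hL] at hmap
    simp only [Option.map_some, Option.some.injEq] at hmap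
    have hlen : L.length = 2 := by
      have := splitOnMax_stack_len u
      rw [hu] at this
      calc L.length = (L.map String.toList).length := by simp
        _ = 2 := by rw [hmap]; rw [← hu] at this ⊢; exact this
    obtain ⟨a, b, rfl⟩ := List.length_eq_two.mp hlen
    exact ⟨b, pyGet?_pair a b⟩

-- componentwise step lemmas: B's accumulator update .or the rest-of-list scan = the full scan
lemma comp_ret (t : String) (rest : List String) (r : Option String) :
    (if r = none ∧ PySem.Str.startswith t "return_in:" = true then
        PySem.List.pyGet? ((PySem.Str.splitMax? t ":" 1).getD []) 1
      else r).or (loopA_return rest) = r.or (loopA_return (t :: rest)) := by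
  cases r with
  | some v => simp
  | none =>
    simp only [loopA_return]
    by_cases h : PySem.Str.startswith t "return_in:" = true
    · obtain ⟨v, hv⟩ := ret_isSome t h
      rw [if_pos ⟨trivial, h⟩, if_pos h, hv]; simp
    · rw [if_neg (fun hc => h hc.2), if_neg h]

lemma comp_call (t : String) (rest : List String) (c : Option String) :
    (if c = none ∧ PySem.Str.startswith t "call_arg:" = true then
        (let parts := (PySem.Str.split? t ":").getD []
         if 4 ≤ parts.length ∧ (PySem.List.pyGet? parts 3).getD "" ≠ "" then
           PySem.List.pyGet? parts 3
         else c)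
      else c).or (loopA_call rest) = c.or (loopA_call (t :: rest)) := by
  cases c with
  | some v => simp
  | none =>
    simp only [loopA_call]
    by_cases h : PySem.Str.startswith t "call_arg:" = true
    · by_cases hc : 4 ≤ ((PySem.Str.split? t ":").getD []).length ∧
          (PySem.List.pyGet? ((PySem.Str.split? t ":").getD []) 3).getD "" ≠ ""
      · obtain ⟨v, hv⟩ := pyGet?_three_isSome _ hc.1
        rw [if_pos ⟨trivial, h⟩, if_pos h, if_pos hc, if_pos hc, hv]; simp
      · rw [if_pos ⟨trivial, h⟩, if_pos h, if_neg hc, if_neg hc]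
    · rw [if_neg (fun hc => h hc.2), if_neg h]

lemma comp_stack (t : String) (rest : List String) (s : Option String) :
    (if s = none ∧ PySem.Str.startswith t "in_stack_usage:" = true then
        PySem.List.pyGet? ((PySem.Str.splitMax? t ":" 1).getD []) 1
      else s).or (loopA_stack rest) = s.or (loopA_stack (t :: rest)) := by
  cases s with
  | some v => simp
  | none =>
    simp only [loopA_stack]
    by_cases h : PySem.Str.startswith t "in_stack_usage:" = true
    · obtain ⟨v, hv⟩ := stack_isSome t h
      rw [if_pos ⟨trivial, h⟩, if_pos h, hv]; simp
    · rw [if_neg (fun hc => h hc.2), if_neg h]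

lemma bLoop_eq (tags : List String) (r c s : Option String) :
    bLoop tags r c s = (r.or (loopA_return tags)).or ((c.or (loopA_call tags)).or (s.or (loopA_stack tags))) := by
  induction tags generalizing r c s with
  | nil =>
    cases r <;> cases c <;> simp [bLoop, loopA_return, loopA_call, loopA_stack]
  | cons t rest ih =>
    show bLoop rest _ _ _ = _
    rw [ih, comp_ret, comp_call, comp_stack]

-- ===== VERDICT (by name: the statement is the Claim_ definition above) =====
theorem find_var_function_py_spec : Claim_equal_find_var_function_py := by
  intro var tags _
  unfold Spec_find_var_function_py find_var_function_py find_var_function_py_alt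
  rw [bLoop_eq]
  cases loopA_return tags <;> cases loopA_call tags <;> simp
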